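-- pv_equiv track=rewrite | github.com/NIckmin96/algos | 프로그래머스/2/87390. n＾2 배열 자르기/n＾2 배열 자르기.py | solution
-- ===== SOURCE A (Python) =====
-- def solution(n, left, right):
--     answer = []
--     # left, right가 각각 몇행 몇열인지 예측해서 만들기
--     left_r = left//n+1
--     left_c = left%n+1
--     right_r = right//n+1
--     right_c = right%n+1
--
--     for i in range(left_r, right_r+1):
--         tmp = list(range(1,n+1))
--         for j in range(i):
--             tmp[j]=i
--
--         if (i==left_r)&(i==right_r):
--             answer+=tmp[left_c-1:right_c]
--         elif i==left_r:
--             answer+=tmp[left_c-1:]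
--         elif i==right_r:
--             answer+=tmp[:right_c]
--         else:
--             answer+=tmp
--
--     # for i in range(left_r,right_r+1):
--     #     if i ==left_r:
--     #         # 행의 수 만큼 반복되는 수
--     #         answer+=[left_r for _ in range(left_r-left_c+1)]
--     #         # 그 뒤에 1씩 증가되어 N까지 가는 수
--     #         answer+=[j for j in range(max(left_r+1,left_c),n+1)]
--     #     elif i==right_r:
--     #         # 행의 수 만큼 반복되는 수
--     #         answer+=[right_r for _ in range(min(right_r, right_c))]
--     #         # 그 뒤에 1씩 증가되어 right_c까지
--     #         answer+=[j for j in range(right_r+1,right_c+1)]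
--     #     else:
--     #         answer+=[i for _ in range(i)]
--     #         answer+=[j for j in range(i+1,n+1)]
--
--     return answer
-- ===== SOURCE B (Python) =====
-- def solution(n, left, right):
--     return [max(k // n, k % n) + 1 for k in range(left, right + 1)]
-- ===== Notes on version B (the rewrite author's own statement) =====
-- stated objective: simpler
-- what changed: B replaces A's row-by-row construction (building each full n-element row list, overwriting its prefix, then slicing it per branch) by a one-line closed-form per-index formula max(k//n, k%n)+1 mapped over range(left, right+1).
-- outside the precondition, e.g. on solution(-3, 0, 2): A returns [], B returns [1, 0, 0]; on solution(0, 0, 2): A raises ZeroDivisionError, B raises ZeroDivisionError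
import Mathlib
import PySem

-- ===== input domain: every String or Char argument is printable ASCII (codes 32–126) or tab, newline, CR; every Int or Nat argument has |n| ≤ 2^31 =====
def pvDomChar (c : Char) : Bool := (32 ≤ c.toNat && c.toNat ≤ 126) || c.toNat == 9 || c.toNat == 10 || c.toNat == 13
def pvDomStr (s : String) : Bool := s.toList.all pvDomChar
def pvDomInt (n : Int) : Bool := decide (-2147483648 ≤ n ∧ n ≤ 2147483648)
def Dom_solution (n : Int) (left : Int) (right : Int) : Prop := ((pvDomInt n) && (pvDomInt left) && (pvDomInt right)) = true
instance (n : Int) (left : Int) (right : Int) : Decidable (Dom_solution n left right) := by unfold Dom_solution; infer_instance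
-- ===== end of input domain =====

-- B replaces A's row-building-and-slicing loop by the closed-form cell value max(k//n,k%n)+1 mapped over the index window (objective: simpler).


-- ===== PORT A =====
-- literal port of A; 'tmp[j]=i' is pySetD (exact here: Pre_ keeps every written index in range)
def solution (n : Int) (left : Int) (right : Int) : List Int :=
  let left_r := PySem.Int.floordiv left n + 1
  let left_c := PySem.Int.mod left n + 1
  let right_r := PySem.Int.floordiv right n + 1
  let right_c := PySem.Int.mod right n + 1
  (PySem.List.pyRange left_r (right_r + 1) 1).foldl
    (fun answer i =>
      let tmp0 := PySem.List.pyRange 1 (n + 1) 1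
      let tmp := (PySem.List.pyRange 0 i 1).foldl (fun t j => PySem.List.pySetD t j i) tmp0
      if i = left_r ∧ i = right_r then answer ++ PySem.List.slice tmp (some (left_c - 1)) (some right_c)
      else if i = left_r then answer ++ PySem.List.slice tmp (some (left_c - 1)) none
      else if i = right_r then answer ++ PySem.List.slice tmp none (some right_c)
      else answer ++ tmp) []

-- ===== PORT B =====
def solution_alt (n : Int) (left : Int) (right : Int) : List Int :=
  (PySem.List.pyRange left (right + 1) 1).map
    (fun k => max (PySem.Int.floordiv k n) (PySem.Int.mod k n) + 1)

-- ===== PRECONDITION & SPEC =====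
-- Pre_ excludes n ≤ 0 (outside the natural domain n ≥ 1: n = 0 raises ZeroDivisionError, n < 0 yields accidental
-- values of the negative-divisor row arithmetic) and the region right ≥ n² with right//n ≥ left//n, where A raises IndexError.
def Pre_solution (n : Int) (left : Int) (right : Int) : Prop :=
  1 ≤ n ∧ (right < n * n ∨ PySem.Int.floordiv right n < PySem.Int.floordiv left n)
instance (n : Int) (left : Int) (right : Int) : Decidable (Pre_solution n left right) := by unfold Pre_solution; infer_instance

def pvWitness_solution : Int × Int × Int := (3, 2, 7)

def Spec_solution (n : Int) (left : Int) (right : Int) (out : List Int) : Prop := out = solution_alt n left right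
instance (n : Int) (left : Int) (right : Int) (out : List Int) : Decidable (Spec_solution n left right out) := by unfold Spec_solution; infer_instance

-- ===== CLAIM (what is proved, stated in full; the proofs are below) =====
def Claim_equal_solution : Prop := ∀ (n : Int) (left : Int) (right : Int), Dom_solution n left right → Pre_solution n left right → Spec_solution n left right (solution n left right)

-- ===== LEMMAS AND PROOFS =====

-- closed-form value of flat cell k (ediv/emod form, equal to B's formula for 0 < n)
def fC (n k : Int) : Int := max (k / n) (k % n) + 1

-- abbreviation for step-1 ranges
def P (a b : Int) : List Int := PySem.List.pyRange a b 1

lemma alt_eq (n left right : Int) (hn : 1 ≤ n) :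
    solution_alt n left right = (P left (right + 1)).map (fC n) := by
  unfold solution_alt P fC
  refine List.map_congr_left (fun k _ => ?_)
  rw [PySem.Int.floordiv_eq_ediv_of_pos (by omega), PySem.Int.mod_eq_emod_of_pos (by omega)]

lemma divmod_shift (n q x : Int) (hn : 1 ≤ n) (hx : 0 ≤ x) (hxn : x < n) :
    (q * n + x) / n = q ∧ (q * n + x) % n = x := by
  have hcomm : q * n + x = x + q * n := by ring
  constructor
  · rw [hcomm, Int.add_mul_ediv_right x q (show n ≠ 0 by omega),
      Int.ediv_eq_zero_of_lt hx hxn]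
    omega
  · have h := Int.add_mul_emod_self_left (a := x) (b := n) (c := q)
    rw [hcomm]
    have hmul : x + q * n = x + n * q := by ring
    rw [hmul, h, Int.emod_eq_of_lt hx hxn]

-- length of the prefix-overwrite fold
lemma len_fold (L : List Int) (v : Int) (xs : List Int) :
    (L.foldl (fun t j => PySem.List.pySetD t j v) xs).length = xs.length := by
  induction L generalizing xs with
  | nil => rfl
  | cons a L ih => simp [List.foldl, ih, PySem.List.length_pySetD]

lemma getD_fold (m : Nat) (xs : List Int) (v d : Int) (hm : m ≤ xs.length) (k : Nat) :
    PySem.List.pyGetD ((P 0 (m : Int)).foldl (fun t j => PySem.List.pySetD t j v) xs) (k : Int) d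
      = if k < m then v else PySem.List.pyGetD xs (k : Int) d := by
  induction m generalizing k with
  | zero =>
    simp [P]
  | succ m ih =>
    have hcast : ((m + 1 : Nat) : Int) = (m : Int) + 1 := by push_cast; ring
    have hsplit : P 0 ((m + 1 : Nat) : Int) = P 0 (m : Int) ++ [(m : Int)] := by
      rw [P, P, hcast]; exact PySem.List.pyRange_one_succ_right (by positivity)
    rw [hsplit, List.foldl_append]
    have hlen : ((P 0 (m : Int)).foldl (fun t j => PySem.List.pySetD t j v) xs).length = xs.length :=
      len_fold _ _ _
    rw [List.foldl_cons, List.foldl_nil]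
    rw [PySem.List.pyGetD_pySetD_natCast _ m k v d (by omega)]
    by_cases hk : k = m
    · simp [hk]
    · simp only [hk, if_false]
      rw [ih (by omega)]
      by_cases h2 : k < m
      · simp [h2, Nat.lt_succ_of_lt h2]
      · have h3 : ¬ k < m + 1 := by omega
        simp [h2, h3]

-- entry j of the base row [1..n]
lemma base_get (n j : Int) (hj : 0 ≤ j) (hjn : j < n) :
    PySem.List.pyGetD (PySem.List.pyRange 1 (n + 1) 1) j 0 = j + 1 := by
  have hlen : (PySem.List.pyRange 1 (n + 1) 1).length = n.toNat := by
    rw [PySem.List.length_pyRange_one]; omega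
  rw [PySem.List.pyGetD_eq_getElem _ 0 hj (by rw [hlen]; omega)]
  rw [PySem.List.getElem_pyRange_one]
  omega

-- the row list after the inner loop: entry j is max i (j+1)
lemma tmp_eq (n i : Int) (hn : 1 ≤ n) (hi : i ≤ n) :
    (PySem.List.pyRange 0 i 1).foldl (fun t j => PySem.List.pySetD t j i) (PySem.List.pyRange 1 (n + 1) 1)
      = (P 0 n).map (fun j => max i (j + 1)) := by
  set L := (PySem.List.pyRange 0 i 1).foldl (fun t j => PySem.List.pySetD t j i)
    (PySem.List.pyRange 1 (n + 1) 1) with hL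
  have hblen : (PySem.List.pyRange 1 (n + 1) 1).length = n.toNat := by
    rw [PySem.List.length_pyRange_one]; omega
  have hlen : L.length = n.toNat := by rw [hL, len_fold, hblen]
  have hget : ∀ j : Int, 0 ≤ j → j < n → PySem.List.pyGetD L j 0 = max i (j + 1) := by
    intro j hj hjn
    by_cases hipos : 0 ≤ i
    · have hir : PySem.List.pyRange 0 i 1 = P 0 ((i.toNat : Nat) : Int) := by
        rw [P, Int.toNat_of_nonneg hipos]
      have hjr : j = ((j.toNat : Nat) : Int) := (Int.toNat_of_nonneg hj).symm
      rw [hL, hir, hjr, getD_fold i.toNat _ i 0 (by rw [hblen]; omega)]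
      by_cases hc : j.toNat < i.toNat
      · have hmax : max i (j + 1) = i := by omega
        rw [if_pos hc]; omega
      · simp only [hc, if_false]
        rw [← hjr, base_get n j hj hjn]
        omega
    · have : PySem.List.pyRange 0 i 1 = [] := PySem.List.pyRange_one_eq_nil (by omega)
      rw [hL, this, List.foldl_nil, base_get n j hj hjn]
      omega
  calc L = (PySem.List.pyRange 0 (L.length : Int) 1).map (fun j => PySem.List.pyGetD L j 0) :=
        (PySem.List.map_pyGetD_pyRange_zero' L 0).symm
    _ = (P 0 n).map (fun j => PySem.List.pyGetD L j 0) := by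
        rw [hlen, P]
        congr 1
        congr 1
        omega
    _ = (P 0 n).map (fun j => max i (j + 1)) := by
        refine List.map_congr_left (fun j hj => ?_)
        have := PySem.List.mem_pyRange_one.mp hj
        exact hget j this.1 this.2

-- a map of the row function over a column range is a map of fC over the flat-index range
lemma seg_eq (n i c d : Int) (hn : 1 ≤ n) (hc : 0 ≤ c) (hd : d ≤ n) :
    (P c d).map (fun j => max i (j + 1)) = (P ((i - 1) * n + c) ((i - 1) * n + d)).map (fC n) := by
  rw [P, P, PySem.List.pyRange_one c d, PySem.List.pyRange_one ((i - 1) * n + c) ((i - 1) * n + d)]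
  have harg : (i - 1) * n + d - ((i - 1) * n + c) = d - c := by ring
  rw [harg]
  simp only [List.map_map]
  refine List.map_congr_left (fun k hk => ?_)
  have hk' : (k : Int) < d - c := by
    have := List.mem_range.mp hk; omega
  simp only [Function.comp_apply]
  have hx0 : (0:Int) ≤ c + k := by positivity
  have hxn : c + (k : Int) < n := by omega
  have harg2 : (i - 1) * n + c + (k : Int) = (i - 1) * n + (c + k) := by ring
  rw [fC, harg2, (divmod_shift n (i - 1) (c + k) hn hx0 hxn).1,
    (divmod_shift n (i - 1) (c + k) hn hx0 hxn).2]
  omega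

lemma P_nil {a b : Int} (h : b ≤ a) : P a b = [] := PySem.List.pyRange_one_eq_nil h

lemma P_cons {a b : Int} (h : a < b) : P a b = a :: P (a + 1) b := PySem.List.pyRange_one_cons h

lemma P_append (a m b : Int) (h1 : a ≤ m) (h2 : m ≤ b) : P a b = P a m ++ P m b :=
  PySem.List.pyRange_one_append a m b h1 h2

lemma len_mapP (f : Int → Int) (a b : Int) : ((P a b).map f).length = (b - a).toNat := by
  simp [P, PySem.List.length_pyRange_one]

lemma rows_eq (n left right : Int) (hn : 1 ≤ n) (hle : left ≤ right) (hrn : right < n * n) :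
    ∀ (fuel : Nat) (a : Int) (acc : List Int),
      left / n + 1 ≤ a → right / n + 1 + 1 - a = (fuel : Int) →
    (P a (right / n + 1 + 1)).foldl
      (fun answer i =>
        if i = left / n + 1 ∧ i = right / n + 1 then
          answer ++ PySem.List.slice
            ((PySem.List.pyRange 0 i 1).foldl (fun t j => PySem.List.pySetD t j i)
              (PySem.List.pyRange 1 (n + 1) 1)) (some (left % n + 1 - 1)) (some (right % n + 1))
        else if i = left / n + 1 then
          answer ++ PySem.List.slice
            ((PySem.List.pyRange 0 i 1).foldl (fun t j => PySem.List.pySetD t j i)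
              (PySem.List.pyRange 1 (n + 1) 1)) (some (left % n + 1 - 1)) none
        else if i = right / n + 1 then
          answer ++ PySem.List.slice
            ((PySem.List.pyRange 0 i 1).foldl (fun t j => PySem.List.pySetD t j i)
              (PySem.List.pyRange 1 (n + 1) 1)) none (some (right % n + 1))
        else answer ++
          (PySem.List.pyRange 0 i 1).foldl (fun t j => PySem.List.pySetD t j i)
            (PySem.List.pyRange 1 (n + 1) 1)) acc
      = acc ++ (P (if a = left / n + 1 then left else (a - 1) * n) (right + 1)).map (fC n) := by
  have hn0 : (0:Int) < n := by omega
  have hLd : n * (left / n) + left % n = left := Int.ediv_add_emod left n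
  have hRd : n * (right / n) + right % n = right := Int.ediv_add_emod right n
  have hx0 : 0 ≤ left % n := Int.emod_nonneg left (by omega)
  have hxn : left % n < n := Int.emod_lt_of_pos left hn0
  have hy0 : 0 ≤ right % n := Int.emod_nonneg right (by omega)
  have hyn : right % n < n := Int.emod_lt_of_pos right hn0
  have hdivle : left / n ≤ right / n := Int.ediv_le_ediv hn0 hle
  have hrn2 : n * (right / n) < n * n := by omega
  have hrlt : right / n < n := lt_of_mul_lt_mul_left hrn2 (by omega)
  intro fuel
  induction fuel with
  | zero =>
    intro a acc ha hf
    have ha' : a = right / n + 1 + 1 := by omega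
    subst ha'
    rw [P_nil (le_refl _), List.foldl_nil]
    rw [if_neg (by omega : ¬ (right / n + 1 + 1 = left / n + 1))]
    have he : (right / n + 1 + 1 - 1) * n = n * (right / n) + n := by ring
    rw [P_nil (by omega : right + 1 ≤ (right / n + 1 + 1 - 1) * n), List.map_nil, List.append_nil]
  | succ fuel ih =>
    intro a acc ha hf
    have halt : a < right / n + 1 + 1 := by omega
    have han : a ≤ n := by omega
    rw [P_cons halt, List.foldl_cons, ih (a + 1) _ (by omega) (by omega)]
    rw [if_neg (by omega : ¬ (a + 1 = left / n + 1))]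
    have e0 : a + 1 - 1 = a := by ring
    rw [e0]
    rw [tmp_eq n a hn han]
    have hanl : (a - 1) * n + n = a * n := by ring
    have hadd : a ≤ right / n → a * n ≤ right + 1 := by
      intro h
      have h1 : a * n ≤ (right / n) * n := Int.mul_le_mul_of_nonneg_right h (by omega)
      have h2 : (right / n) * n = n * (right / n) := by ring
      omega
    by_cases hA : a = left / n + 1
    · by_cases hB : a = right / n + 1
      · -- single overlap row: first and last
        rw [if_pos ⟨hA, hB⟩]
        have hq : left / n = right / n := by omega
        have hxy : left % n ≤ right % n := by
          rw [hq] at hLd; omega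
        have e1 : left % n + 1 - 1 = left % n := by ring
        rw [e1, PySem.List.slice_toNat _ hx0 (by omega : (0:Int) ≤ right % n + 1)]
        rw [P_append 0 (right % n + 1) n (by omega) (by omega),
          P_append 0 (left % n) (right % n + 1) (by omega) (by omega)]
        rw [List.map_append, List.map_append,
          List.append_assoc (List.map (fun j => max a (j + 1)) (P 0 (left % n)))]
        rw [List.drop_left' (len_mapP _ _ _ |>.trans (by omega))]
        have elen : (right % n + 1).toNat - (left % n).toNat
            = ((right % n + 1) - left % n).toNat := by omega
        rw [elen, List.take_left' (len_mapP _ _ _)]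
        rw [seg_eq n a (left % n) (right % n + 1) hn hx0 (by omega)]
        have e2 : (a - 1) * n + left % n = left := by
          have : (a - 1) * n = n * (left / n) := by rw [hA]; ring
          omega
        have e3 : (a - 1) * n + (right % n + 1) = right + 1 := by
          have : (a - 1) * n = n * (right / n) := by rw [hA, hq]; ring
          omega
        rw [e2, e3]
        have etail : P (a * n) (right + 1) = [] := by
          refine P_nil ?_
          have : a * n = n * (right / n) + n := by rw [hB]; ring
          omega
        rw [etail, List.map_nil, List.append_nil, if_pos hA]
      · -- first row only
        rw [if_neg (by tauto), if_pos hA]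
        have e1 : left % n + 1 - 1 = left % n := by ring
        rw [e1, PySem.List.slice_from _ hx0]
        rw [P_append 0 (left % n) n (by omega) (by omega), List.map_append]
        rw [List.drop_left' (len_mapP _ _ _ |>.trans (by omega))]
        rw [seg_eq n a (left % n) n hn hx0 (le_refl _)]
        have e2 : (a - 1) * n + left % n = left := by
          have : (a - 1) * n = n * (left / n) := by rw [hA]; ring
          omega
        rw [e2, hanl, List.append_assoc, ← List.map_append]
        have hlan : left ≤ a * n := by
          have : a * n = n * (left / n) + n := by rw [hA]; ring
          omega
        rw [← P_append left (a * n) (right + 1) hlan (hadd (by omega)), if_pos hA]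
    · by_cases hB : a = right / n + 1
      · -- last row only
        rw [if_neg (by tauto), if_neg hA, if_pos hB]
        rw [PySem.List.slice_to _ (by omega : (0:Int) ≤ right % n + 1)]
        rw [P_append 0 (right % n + 1) n (by omega) (by omega), List.map_append]
        rw [List.take_left' (len_mapP _ _ _ |>.trans (by omega))]
        rw [seg_eq n a 0 (right % n + 1) hn (le_refl _) (by omega)]
        have e2 : (a - 1) * n + 0 = (a - 1) * n := by ring
        have e3 : (a - 1) * n + (right % n + 1) = right + 1 := by
          have : (a - 1) * n = n * (right / n) := by rw [hB]; ring
          omega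
        rw [e2, e3]
        have etail : P (a * n) (right + 1) = [] := by
          refine P_nil ?_
          have : a * n = n * (right / n) + n := by rw [hB]; ring
          omega
        rw [etail, List.map_nil, List.append_nil, if_neg hA]
      · -- middle row
        rw [if_neg (by tauto), if_neg hA, if_neg hB]
        rw [seg_eq n a 0 n hn (le_refl _) (le_refl _)]
        have e2 : (a - 1) * n + 0 = (a - 1) * n := by ring
        rw [e2, hanl, List.append_assoc, ← List.map_append]
        have h1 : (a - 1) * n ≤ a * n := by
          have : a * n = (a - 1) * n + n := by ring
          omega
        rw [← P_append ((a - 1) * n) (a * n) (right + 1) h1 (hadd (by omega)), if_neg hA]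

lemma solution_ediv (n left right : Int) (hn : 1 ≤ n) :
    solution n left right
      = (P (left / n + 1) (right / n + 1 + 1)).foldl
        (fun answer i =>
          if i = left / n + 1 ∧ i = right / n + 1 then
            answer ++ PySem.List.slice
              ((PySem.List.pyRange 0 i 1).foldl (fun t j => PySem.List.pySetD t j i)
                (PySem.List.pyRange 1 (n + 1) 1)) (some (left % n + 1 - 1)) (some (right % n + 1))
          else if i = left / n + 1 then
            answer ++ PySem.List.slice
              ((PySem.List.pyRange 0 i 1).foldl (fun t j => PySem.List.pySetD t j i)
                (PySem.List.pyRange 1 (n + 1) 1)) (some (left % n + 1 - 1)) none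
          else if i = right / n + 1 then
            answer ++ PySem.List.slice
              ((PySem.List.pyRange 0 i 1).foldl (fun t j => PySem.List.pySetD t j i)
                (PySem.List.pyRange 1 (n + 1) 1)) none (some (right % n + 1))
          else answer ++
            (PySem.List.pyRange 0 i 1).foldl (fun t j => PySem.List.pySetD t j i)
              (PySem.List.pyRange 1 (n + 1) 1)) [] := by
  unfold solution P
  simp only [PySem.Int.floordiv_eq_ediv_of_pos (show (0:Int) < n by omega),
    PySem.Int.mod_eq_emod_of_pos (show (0:Int) < n by omega)]

-- ===== VERDICT (by name: the statement is the Claim_ definition above) =====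
theorem solution_spec : Claim_equal_solution := by
  intro n left right hdom hpre
  obtain ⟨hn, hd⟩ := hpre
  unfold Spec_solution
  rw [alt_eq n left right hn, solution_ediv n left right hn]
  have hn0 : (0:Int) < n := by omega
  by_cases hle : left ≤ right
  · have hrn : right < n * n := by
      rcases hd with h | h
      · exact h
      · rw [PySem.Int.floordiv_eq_ediv_of_pos hn0, PySem.Int.floordiv_eq_ediv_of_pos hn0] at h
        exact absurd (Int.ediv_le_ediv hn0 hle) (by omega)
    have hlr : left / n ≤ right / n := Int.ediv_le_ediv hn0 hle
    rw [rows_eq n left right hn hle hrn (right / n + 1 + 1 - (left / n + 1)).toNat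
      (left / n + 1) [] (le_refl _) (by omega)]
    rw [if_pos rfl, List.nil_append]
  · have hge : right / n ≤ left / n := Int.ediv_le_ediv hn0 (by omega)
    have hBnil : P left (right + 1) = [] := P_nil (by omega)
    rw [hBnil, List.map_nil]
    by_cases hq : right / n < left / n
    · rw [P_nil (by omega : right / n + 1 + 1 ≤ left / n + 1), List.foldl_nil]
    · have hq' : left / n = right / n := by omega
      have hsing : P (left / n + 1) (right / n + 1 + 1) = [left / n + 1] := by
        rw [hq', P]; exact PySem.List.pyRange_one_singleton _
      rw [hsing, List.foldl_cons, List.foldl_nil]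
      rw [if_pos ⟨rfl, by omega⟩]
      have hx0 : 0 ≤ left % n + 1 - 1 := by
        have := Int.emod_nonneg left (show n ≠ 0 by omega); omega
      rw [PySem.List.slice_toNat _ hx0 (by
        have := Int.emod_nonneg right (show n ≠ 0 by omega); omega)]
      have hLd : n * (left / n) + left % n = left := Int.ediv_add_emod left n
      have hRd : n * (right / n) + right % n = right := Int.ediv_add_emod right n
      have hyx : right % n < left % n := by rw [hq'] at hLd; omega
      have htake : (right % n + 1).toNat - (left % n + 1 - 1).toNat = 0 := by
        have := Int.emod_nonneg right (show n ≠ 0 by omega); omega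
      rw [htake, List.take_zero, List.nil_append]
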